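-- pv_equiv track=rewrite | github.com/matianyun060926-a11y/Transfer-Tool | tools/generate_icon_assets.py | _point_in_rounded_rect
-- ===== SOURCE A (Python) =====
-- def _point_in_rounded_rect(px: int, py: int, x: int, y: int, w: int, h: int, radius: int) -> bool:
--     if w <= 0 or h <= 0:
--         return False
--     if not (x <= px < x + w and y <= py < y + h):
--         return False
--
--     radius = max(0, min(radius, w // 2, h // 2))
--     if radius == 0:
--         return True
--
--     in_middle_x = x + radius <= px < x + w - radius
--     in_middle_y = y + radius <= py < y + h - radius
--     if in_middle_x or in_middle_y:
--         return True
--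
--     radius_sq = radius * radius
--     corners = (
--         (x + radius, y + radius),
--         (x + w - radius - 1, y + radius),
--         (x + radius, y + h - radius - 1),
--         (x + w - radius - 1, y + h - radius - 1),
--     )
--     for cx, cy in corners:
--         dx = px - cx
--         dy = py - cy
--         if dx * dx + dy * dy <= radius_sq:
--             return True
--     return False
-- ===== SOURCE B (Python) =====
-- def _axis_offset(p, lo, hi):
--     # 0 inside the straight band [lo, hi]; otherwise signed offset to the nearer corner centre
--     if lo <= p <= hi:
--         return 0
--     d1 = p - lo
--     d2 = p - hi
--     return d1 if abs(d1) <= abs(d2) else d2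
--
--
-- def _point_in_rounded_rect(px: int, py: int, x: int, y: int, w: int, h: int, radius: int) -> bool:
--     if w <= 0 or h <= 0:
--         return False
--     if not (x <= px < x + w and y <= py < y + h):
--         return False
--
--     radius = max(0, min(radius, w // 2, h // 2))
--     if radius == 0:
--         return True
--
--     ex = _axis_offset(px, x + radius, x + w - radius - 1)
--     ey = _axis_offset(py, y + radius, y + h - radius - 1)
--     return ex * ex + ey * ey <= radius * radius
-- ===== Notes on version B (the rewrite author's own statement) =====
-- stated objective: simpler
-- what changed: Replaces the middle-band OR plus the 4-corner distance loop by a per-axis signed offset to the nearer corner centre (0 inside the straight band) and a single squared-distance test.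
import Mathlib
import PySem

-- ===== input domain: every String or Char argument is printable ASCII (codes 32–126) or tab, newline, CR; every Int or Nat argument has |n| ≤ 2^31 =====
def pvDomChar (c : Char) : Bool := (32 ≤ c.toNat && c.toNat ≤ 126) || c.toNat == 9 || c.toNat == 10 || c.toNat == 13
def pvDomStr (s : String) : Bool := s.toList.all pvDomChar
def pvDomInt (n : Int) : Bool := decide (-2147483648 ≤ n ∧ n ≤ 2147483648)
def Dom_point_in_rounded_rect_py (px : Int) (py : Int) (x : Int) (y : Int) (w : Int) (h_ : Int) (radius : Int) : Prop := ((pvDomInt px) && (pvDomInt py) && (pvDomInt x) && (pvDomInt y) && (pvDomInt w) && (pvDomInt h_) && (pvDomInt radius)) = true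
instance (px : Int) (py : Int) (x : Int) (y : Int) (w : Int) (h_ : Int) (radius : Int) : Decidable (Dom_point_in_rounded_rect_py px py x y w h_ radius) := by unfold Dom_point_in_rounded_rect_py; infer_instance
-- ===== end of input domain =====

-- B replaces A's middle-band OR and 4-corner distance loop by a per-axis signed offset to
-- the nearer corner centre and one squared-distance test (objective: simpler).

-- ===== PORT A =====
def point_in_rounded_rect_py (px : Int) (py : Int) (x : Int) (y : Int) (w : Int) (h_ : Int) (radius : Int) : Bool :=
  if w ≤ 0 ∨ h_ ≤ 0 then false
  else if ¬ (x ≤ px ∧ px < x + w ∧ y ≤ py ∧ py < y + h_) then false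
  else
    let r := max 0 (min (min radius (PySem.Int.floordiv w 2)) (PySem.Int.floordiv h_ 2))
    if r = 0 then true
    else
      let in_middle_x := x + r ≤ px ∧ px < x + w - r
      let in_middle_y := y + r ≤ py ∧ py < y + h_ - r
      if in_middle_x ∨ in_middle_y then true
      else
        let radius_sq := r * r
        let corners : List (Int × Int) :=
          [(x + r, y + r), (x + w - r - 1, y + r),
           (x + r, y + h_ - r - 1), (x + w - r - 1, y + h_ - r - 1)]
        corners.any (fun c =>
          let dx := px - c.1
          let dy := py - c.2
          decide (dx * dx + dy * dy ≤ radius_sq))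

-- ===== PORT B =====
def pvAxisOffset (p : Int) (lo : Int) (hi : Int) : Int :=
  if lo ≤ p ∧ p ≤ hi then 0
  else
    let d1 := p - lo
    let d2 := p - hi
    if |d1| ≤ |d2| then d1 else d2

def point_in_rounded_rect_py_alt (px : Int) (py : Int) (x : Int) (y : Int) (w : Int) (h_ : Int) (radius : Int) : Bool :=
  if w ≤ 0 ∨ h_ ≤ 0 then false
  else if ¬ (x ≤ px ∧ px < x + w ∧ y ≤ py ∧ py < y + h_) then false
  else
    let r := max 0 (min (min radius (PySem.Int.floordiv w 2)) (PySem.Int.floordiv h_ 2))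
    if r = 0 then true
    else
      let ex := pvAxisOffset px (x + r) (x + w - r - 1)
      let ey := pvAxisOffset py (y + r) (y + h_ - r - 1)
      decide (ex * ex + ey * ey ≤ r * r)

-- ===== PRECONDITION & SPEC =====
def Spec_point_in_rounded_rect_py (px : Int) (py : Int) (x : Int) (y : Int) (w : Int) (h_ : Int) (radius : Int) (out : Bool) : Prop := out = point_in_rounded_rect_py_alt px py x y w h_ radius
instance (px : Int) (py : Int) (x : Int) (y : Int) (w : Int) (h_ : Int) (radius : Int) (out : Bool) : Decidable (Spec_point_in_rounded_rect_py px py x y w h_ radius out) := by unfold Spec_point_in_rounded_rect_py; infer_instance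

-- ===== CLAIM (what is proved, stated in full; the proofs are below) =====
def Claim_equal_point_in_rounded_rect_py : Prop := ∀ (px : Int) (py : Int) (x : Int) (y : Int) (w : Int) (h_ : Int) (radius : Int), Dom_point_in_rounded_rect_py px py x y w h_ radius → Spec_point_in_rounded_rect_py px py x y w h_ radius (point_in_rounded_rect_py px py x y w h_ radius)

-- ===== LEMMAS AND PROOFS =====

-- squaring is monotone on absolute values
lemma sq_le_sq_of_abs_le {a b : Int} (h : |a| ≤ |b|) : a * a ≤ b * b := by
  have := mul_self_le_mul_self (abs_nonneg a) h
  simpa [abs_mul_abs_self] using this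

-- outside the band, the offset's square is the smaller of the two corner squares
lemma axisOffset_sq (p lo hi : Int) (h : ¬ (lo ≤ p ∧ p ≤ hi)) :
    pvAxisOffset p lo hi * pvAxisOffset p lo hi
      = min ((p - lo) * (p - lo)) ((p - hi) * (p - hi)) := by
  unfold pvAxisOffset
  rw [if_neg h]
  by_cases hc : |p - lo| ≤ |p - hi|
  · simp only [if_pos hc, min_eq_left (sq_le_sq_of_abs_le hc)]
  · simp only [if_neg hc, min_eq_right (sq_le_sq_of_abs_le (not_le.mp hc).le)]

-- the offset to the nearer centre never exceeds r in magnitude while p stays in the box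
lemma axisOffset_sq_le (p lo hi r : Int) (hr : 0 ≤ r)
    (hlo : lo - r ≤ p) (hhi : p ≤ hi + r) :
    pvAxisOffset p lo hi * pvAxisOffset p lo hi ≤ r * r := by
  unfold pvAxisOffset
  by_cases hb : lo ≤ p ∧ p ≤ hi
  · rw [if_pos hb]; positivity
  · rw [if_neg hb]
    by_cases hc : |p - lo| ≤ |p - hi|
    · rw [if_pos hc]
      apply sq_le_sq_of_abs_le
      rcases abs_cases (p - lo) with ⟨h1, _⟩ | ⟨h1, _⟩ <;>
        rcases abs_cases (p - hi) with ⟨h2, _⟩ | ⟨h2, _⟩ <;>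
        rw [abs_of_nonneg hr] <;> omega
    · rw [if_neg hc]
      apply sq_le_sq_of_abs_le
      rcases abs_cases (p - lo) with ⟨h1, _⟩ | ⟨h1, _⟩ <;>
        rcases abs_cases (p - hi) with ⟨h2, _⟩ | ⟨h2, _⟩ <;>
        rw [abs_of_nonneg hr] <;> omega

-- core equivalence once the shared guards have passed
lemma core_equiv (px py x y w h_ r : Int)
    (hx1 : x ≤ px) (hx2 : px < x + w) (hy1 : y ≤ py) (hy2 : py < y + h_)
    (hr : 1 ≤ r) :
    ((if (x + r ≤ px ∧ px < x + w - r) ∨ (y + r ≤ py ∧ py < y + h_ - r) then true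
      else
        ([((x + r : Int), (y + r : Int)), (x + w - r - 1, y + r),
          (x + r, y + h_ - r - 1), (x + w - r - 1, y + h_ - r - 1)]).any (fun c =>
          decide ((px - c.1) * (px - c.1) + (py - c.2) * (py - c.2) ≤ r * r))) : Bool)
      = decide (pvAxisOffset px (x + r) (x + w - r - 1) * pvAxisOffset px (x + r) (x + w - r - 1)
          + pvAxisOffset py (y + r) (y + h_ - r - 1) * pvAxisOffset py (y + r) (y + h_ - r - 1) ≤ r * r) := by
  have heyle := axisOffset_sq_le py (y + r) (y + h_ - r - 1) r (by omega) (by omega) (by omega)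
  have hexle := axisOffset_sq_le px (x + r) (x + w - r - 1) r (by omega) (by omega) (by omega)
  by_cases hmx : x + r ≤ px ∧ px < x + w - r
  · have hex : pvAxisOffset px (x + r) (x + w - r - 1) = 0 := by
      unfold pvAxisOffset; rw [if_pos ⟨hmx.1, by omega⟩]
    rw [if_pos (Or.inl hmx), hex]
    simp only [zero_mul, zero_add]
    exact (decide_eq_true heyle).symm
  · by_cases hmy : y + r ≤ py ∧ py < y + h_ - r
    · have hey : pvAxisOffset py (y + r) (y + h_ - r - 1) = 0 := by
        unfold pvAxisOffset; rw [if_pos ⟨hmy.1, by omega⟩]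
      rw [if_pos (Or.inr hmy), hey]
      simp only [mul_zero, add_zero]
      exact (decide_eq_true hexle).symm
    · rw [if_neg (by tauto)]
      rw [axisOffset_sq px _ _ (by omega), axisOffset_sq py _ _ (by omega)]
      rw [Bool.eq_iff_iff]
      simp only [List.any_cons, List.any_nil, Bool.or_false, Bool.or_eq_true, decide_eq_true_eq]
      omega

-- ===== VERDICT (by name: the statement is the Claim_ definition above) =====
theorem point_in_rounded_rect_py_spec : Claim_equal_point_in_rounded_rect_py := by
  intro px py x y w h_ radius _
  unfold Spec_point_in_rounded_rect_py point_in_rounded_rect_py point_in_rounded_rect_py_alt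
  by_cases h1 : w ≤ 0 ∨ h_ ≤ 0
  · rw [if_pos h1, if_pos h1]
  rw [if_neg h1, if_neg h1]
  by_cases h2 : ¬ (x ≤ px ∧ px < x + w ∧ y ≤ py ∧ py < y + h_)
  · rw [if_pos h2, if_pos h2]
  rw [if_neg h2, if_neg h2]
  push Not at h1 h2
  set r := max 0 (min (min radius (PySem.Int.floordiv w 2)) (PySem.Int.floordiv h_ 2)) with hrdef
  by_cases h3 : r = 0
  · rw [if_pos h3, if_pos h3]
  rw [if_neg h3, if_neg h3]
  exact core_equiv px py x y w h_ r h2.1 h2.2.1 h2.2.2.1 h2.2.2.2 (by omega)
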